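-- pv_equiv track=rewrite | github.com/dainsiahtill-dev/Polaris | src/backend/polaris/kernelone/tool_execution/code_validator.py | _has_indentation_issues
-- ===== SOURCE A (Python) =====
-- def _has_indentation_issues(code: str) -> bool:
--     """检查代码是否有缩进问题。"""
--     lines = code.split("\n")
--     has_tabs = False
--     has_spaces = False
--     inconsistent_indent = False
--
--     for line in lines:
--         if "\t" in line:
--             has_tabs = True
--         if "    " in line:  # 4 spaces
--             has_spaces = True
--         if has_tabs and has_spaces:
--             return True  # Mixed indentation
--
--         # Check if indentation is multiple of 4
--         stripped = line.lstrip()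
--         if stripped and stripped != line:  # Has leading whitespace
--             leading = line[: len(line) - len(stripped)]
--             if len(leading) % 4 != 0:
--                 inconsistent_indent = True
--
--     return inconsistent_indent
-- ===== SOURCE B (Python) =====
-- def _bad_width(line):
--     stripped = line.lstrip()
--     return bool(stripped) and stripped != line and (len(line) - len(stripped)) % 4 != 0
--
--
-- def _has_indentation_issues(code: str) -> bool:
--     lines = code.split("\n")
--     has_tabs = any("\t" in line for line in lines)
--     has_spaces = any("    " in line for line in lines)
--     if has_tabs and has_spaces:
--         return True
--     return any(_bad_width(line) for line in lines)
-- ===== Notes on version B (the rewrite author's own statement) =====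
-- stated objective: simpler
-- what changed: Replaces the fused single pass with three mutable accumulator flags and a mid-loop early return by three independent whole-list scans (two any() scans for tabs/4-spaces, one any() over a width predicate), valid because A's flags are monotone so the early return equals the global conjunction.
import Mathlib
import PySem

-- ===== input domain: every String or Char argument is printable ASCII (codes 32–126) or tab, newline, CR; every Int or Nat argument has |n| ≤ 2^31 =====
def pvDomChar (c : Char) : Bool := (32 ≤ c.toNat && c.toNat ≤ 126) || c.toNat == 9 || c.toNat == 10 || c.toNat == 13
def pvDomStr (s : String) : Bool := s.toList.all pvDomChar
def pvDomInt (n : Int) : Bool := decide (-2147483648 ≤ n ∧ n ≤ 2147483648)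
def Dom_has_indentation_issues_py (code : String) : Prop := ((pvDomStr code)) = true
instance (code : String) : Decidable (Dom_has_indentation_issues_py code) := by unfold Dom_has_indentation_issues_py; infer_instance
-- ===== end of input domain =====

-- B replaces A's fused single pass (mutable flags + mid-loop early return) by three
-- independent scans over the lines; objective: simpler.

-- ===== PORT A =====
-- the for-loop of A: state (has_tabs, has_spaces, inconsistent_indent), early return on mixed
def pvLoopA : List (List Char) → Bool → Bool → Bool → Bool
  | [], _, _, inc => inc
  | line :: rest, ht, hs, inc =>
    let ht := if PySem.Chars.isIn ['\t'] line then true else ht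
    let hs := if PySem.Chars.isIn [' ', ' ', ' ', ' '] line then true else hs
    if ht && hs then true
    else
      let stripped := PySem.Chars.lstrip line
      let inc :=
        if stripped ≠ [] ∧ stripped ≠ line then
          let leading := PySem.List.slice line none
            (some ((line.length : Int) - (stripped.length : Int)))
          if PySem.Int.mod (leading.length : Int) 4 ≠ 0 then true else inc
        else inc
      pvLoopA rest ht hs inc

def has_indentation_issues_py (code : String) : Bool :=
  pvLoopA (PySem.Chars.splitOn code.toList ['\n']) false false false

-- ===== PORT B =====
def pvBadWidth (line : List Char) : Bool :=
  decide (PySem.Chars.lstrip line ≠ [] ∧ PySem.Chars.lstrip line ≠ line ∧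
    PySem.Int.mod ((line.length : Int) - ((PySem.Chars.lstrip line).length : Int)) 4 ≠ 0)

def has_indentation_issues_py_alt (code : String) : Bool :=
  let lines := PySem.Chars.splitOn code.toList ['\n']
  let has_tabs := lines.any (fun l => PySem.Chars.isIn ['\t'] l)
  let has_spaces := lines.any (fun l => PySem.Chars.isIn [' ', ' ', ' ', ' '] l)
  if has_tabs && has_spaces then true
  else lines.any pvBadWidth

-- ===== PRECONDITION & SPEC =====
def Spec_has_indentation_issues_py (code : String) (out : Bool) : Prop := out = has_indentation_issues_py_alt code
instance (code : String) (out : Bool) : Decidable (Spec_has_indentation_issues_py code out) := by unfold Spec_has_indentation_issues_py; infer_instance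

-- ===== CLAIM (what is proved, stated in full; the proofs are below) =====
def Claim_equal_has_indentation_issues_py : Prop := ∀ (code : String), Dom_has_indentation_issues_py code → Spec_has_indentation_issues_py code (has_indentation_issues_py code)

-- ===== LEMMAS AND PROOFS =====

lemma pvLstrip_len_le (line : List Char) :
    (PySem.Chars.lstrip line).length ≤ line.length := by
  simp [PySem.Chars.lstrip]
  exact List.length_dropWhile_le _ _

-- A's per-line width update equals B's width predicate OR-ed onto the accumulator
lemma pvStep (line : List Char) (inc : Bool) :
    (if PySem.Chars.lstrip line ≠ [] ∧ PySem.Chars.lstrip line ≠ line then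
      (if PySem.Int.mod (((PySem.List.slice line none
          (some ((line.length : Int) - ((PySem.Chars.lstrip line).length : Int)))).length : Int)) 4 ≠ 0
        then true else inc)
      else inc) = (pvBadWidth line || inc) := by
  have hle := pvLstrip_len_le line
  have hcast : ((line.length : Int) - ((PySem.Chars.lstrip line).length : Int))
      = ((line.length - (PySem.Chars.lstrip line).length : Nat) : Int) := by omega
  unfold pvBadWidth
  rw [hcast, PySem.List.slice_to_natCast]
  have hslice : (List.take (line.length - (PySem.Chars.lstrip line).length) line).length
      = line.length - (PySem.Chars.lstrip line).length := by
    simp [List.length_take]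
  rw [hslice]
  by_cases h : PySem.Chars.lstrip line ≠ [] ∧ PySem.Chars.lstrip line ≠ line
  · rw [if_pos h]
    by_cases h4 : PySem.Int.mod ((line.length - (PySem.Chars.lstrip line).length : Nat) : Int) 4 ≠ 0
    · simp [h.1, h.2]
    · cases inc <;> simp_all
  · rw [if_neg h]
    rcases not_and_or.mp h with h' | h' <;> cases inc <;> simp_all

-- A's flags are monotone and checked right after being set, so as long as they are not
-- both set on entry the early return amounts to the global conjunction over all lines
lemma pvLoopA_eq (lines : List (List Char)) (ht hs inc : Bool) (h : (ht && hs) = false) :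
    pvLoopA lines ht hs inc =
      (((ht || lines.any (fun l => PySem.Chars.isIn ['\t'] l)) &&
        (hs || lines.any (fun l => PySem.Chars.isIn [' ', ' ', ' ', ' '] l))) ||
       inc || lines.any pvBadWidth) := by
  induction lines generalizing ht hs inc with
  | nil => cases ht <;> cases hs <;> simp_all [pvLoopA]
  | cons line rest ih =>
    simp only [pvLoopA, List.any_cons, pvStep]
    cases h1 : PySem.Chars.isIn ['\t'] line <;>
      cases h2 : PySem.Chars.isIn [' ', ' ', ' ', ' '] line <;>
        cases ht <;> cases hs <;> simp_all <;>
          cases inc <;> cases pvBadWidth line <;> simp_all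

-- ===== VERDICT (by name: the statement is the Claim_ definition above) =====
theorem has_indentation_issues_py_spec : Claim_equal_has_indentation_issues_py := by
  intro code _
  unfold Spec_has_indentation_issues_py has_indentation_issues_py has_indentation_issues_py_alt
  rw [pvLoopA_eq _ _ _ _ rfl]
  cases h1 : (PySem.Chars.splitOn code.toList ['\n']).any (fun l => PySem.Chars.isIn ['\t'] l) <;>
  cases h2 : (PySem.Chars.splitOn code.toList ['\n']).any (fun l => PySem.Chars.isIn [' ', ' ', ' ', ' '] l) <;>
  simp [h1, h2]
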